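-- pv_equiv track=rewrite | github.com/Hyojeong721/TIL | algorithm/SWA/0812/nyl2353/1210_ladder1/s1.py | choose_ladder
-- ===== SOURCE A (Python) =====
-- def choose_ladder(ladder, N=100):
--     """
--     사다리 게임의 도착지부터 거슬러 올라가 출발지를 찾는 함수
--     ladder : 100 * 100 사다리
--
--     """
--     # 올라가기 시작할 좌표
--     row = N - 1
--     for i in range(N):
--         if ladder[N - 1][i] == 2:
--             col = i
--
--     while row > 0:
--         # 왼쪽 길 있으면, 쭉 가다가 막혔을 때 위로 한 칸
--         if col != 0 and ladder[row][col - 1]: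
--             while col != 0 and ladder[row][col - 1]:
--                 col -= 1
--             row -= 1
--         # 오른쪽 길 있으면, 쭉 가다가 막혔을 때 위로 한 칸
--         elif col != N - 1 and ladder[row][col + 1]:
--             while col != N - 1 and ladder[row][col + 1]:
--                 col += 1
--             row -= 1
--         # 둘 다 길 없으면 위로 한 칸
--         else:
--             row -= 1
--
--     return col
-- ===== SOURCE B (Python) =====
-- def choose_ladder(ladder, N=100):
--     # start column: first 2 scanning the bottom row from the right
--     bottom = ladder[N - 1]
--     for i in range(N - 1, -1, -1):
--         if bottom[i] == 2:
--             col = i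
--             break
--     for row in range(N - 1, 0, -1):
--         r = ladder[row]
--         # per-row run-boundary tables: start[j] = left end of the maximal
--         # truthy run reaching j, end[j] = its right end; built in two passes
--         start = []
--         for j in range(N):
--             start.append(j if j == 0 or not r[j - 1] else start[-1])
--         end = []
--         for j in range(N - 1, -1, -1):
--             end.append(j if j == N - 1 or not r[j + 1] else end[-1])
--         end.reverse()
--         if col > 0 and r[col - 1]:
--             col = start[col - 1]
--         elif col < N - 1 and r[col + 1]:
--             col = end[col + 1]
--     return col
-- ===== Notes on version B (the rewrite author's own statement) =====
-- stated objective: alternative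
-- what changed: B precomputes per-row run-boundary tables (left/right end of each contiguous truthy run, built in two staged passes per row) so each upward move is an O(1) table lookup instead of A's on-demand pointer-chasing inner while loops, and the bottom-row last-match scan becomes a reversed scan with break.
-- outside the precondition, e.g. on choose_ladder([[0], [0, 2]], 2): A returns 1, B returns 1
import Mathlib
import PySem

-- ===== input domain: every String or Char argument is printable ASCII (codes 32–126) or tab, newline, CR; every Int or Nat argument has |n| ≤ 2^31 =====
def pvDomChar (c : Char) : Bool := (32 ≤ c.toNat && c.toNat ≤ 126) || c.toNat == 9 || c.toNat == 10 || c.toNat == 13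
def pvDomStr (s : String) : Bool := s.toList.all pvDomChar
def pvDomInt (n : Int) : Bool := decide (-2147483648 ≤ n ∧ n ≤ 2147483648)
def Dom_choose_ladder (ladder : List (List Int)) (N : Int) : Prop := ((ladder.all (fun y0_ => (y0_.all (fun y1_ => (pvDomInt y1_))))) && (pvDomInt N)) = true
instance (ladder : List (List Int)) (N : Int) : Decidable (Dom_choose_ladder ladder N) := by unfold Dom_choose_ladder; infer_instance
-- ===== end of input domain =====

-- B precomputes per-row run-boundary tables (two staged passes per row) and moves by O(1)
-- table lookups, instead of A's on-demand pointer-chasing inner while loops; the bottom-row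
-- last-match scan becomes a reversed scan with break. Same asymptotic cost ("alternative").

-- ===== PORT A =====
-- for i in range(N): if ladder[N-1][i] == 2: col = i       (col stays unbound if no match: Option)
def chooseScanA (ladder : List (List Int)) (N : Int) : Option Int :=
  (PySem.List.pyRange 0 N 1).foldl
    (fun col i =>
      if PySem.List.pyGetD (PySem.List.pyGetD ladder (N - 1) []) i 0 = 2 then some i else col)
    none

-- while col != 0 and ladder[row][col-1]: col -= 1          (fuel col.toNat is exact: col hits 0 after col steps)
def runLeftA (ladder : List (List Int)) (row : Int) (col : Int) : Nat → Int
  | 0 => col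
  | fuel + 1 =>
    if col ≠ 0 ∧ PySem.List.pyGetD (PySem.List.pyGetD ladder row []) (col - 1) 0 ≠ 0 then
      runLeftA ladder row (col - 1) fuel
    else col

-- while col != N-1 and ladder[row][col+1]: col += 1        (fuel (N-1-col).toNat is exact)
def runRightA (ladder : List (List Int)) (N row : Int) (col : Int) : Nat → Int
  | 0 => col
  | fuel + 1 =>
    if col ≠ N - 1 ∧ PySem.List.pyGetD (PySem.List.pyGetD ladder row []) (col + 1) 0 ≠ 0 then
      runRightA ladder N row (col + 1) fuel
    else col

-- while row > 0: …
def climbA (ladder : List (List Int)) (N : Int) (row col : Int) : Int :=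
  if _h : 0 < row then
    if col ≠ 0 ∧ PySem.List.pyGetD (PySem.List.pyGetD ladder row []) (col - 1) 0 ≠ 0 then
      climbA ladder N (row - 1) (runLeftA ladder row col col.toNat)
    else if col ≠ N - 1 ∧ PySem.List.pyGetD (PySem.List.pyGetD ladder row []) (col + 1) 0 ≠ 0 then
      climbA ladder N (row - 1) (runRightA ladder N row col (N - 1 - col).toNat)
    else
      climbA ladder N (row - 1) col
  else col
termination_by row.toNat
decreasing_by all_goals omega

def choose_ladder (ladder : List (List Int)) (N : Int) : Int :=
  climbA ladder N (N - 1) ((chooseScanA ladder N).getD 0)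

-- ===== PORT B =====
-- for i in range(N-1, -1, -1): if bottom[i] == 2: col = i; break
def scanB (bottom : List Int) (N : Int) : Option Int :=
  (PySem.List.pyRange (N - 1) (-1) (-1)).find?
    (fun i => decide (PySem.List.pyGetD bottom i 0 = 2))

-- start = []; for j in range(N): start.append(j if j == 0 or not r[j-1] else start[-1])
-- (append to a Python list = cons to the reversed list: start[-1] is the head; final .reverse)
def buildStart (r : List Int) (N : Int) : List Int :=
  ((PySem.List.pyRange 0 N 1).foldl
    (fun acc j =>
      (if j = 0 ∨ PySem.List.pyGetD r (j - 1) 0 = 0 then j else acc.headD 0) :: acc)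
    []).reverse

-- end = []; for j in range(N-1, -1, -1): end.append(j if j == N-1 or not r[j+1] else end[-1]); end.reverse()
-- (append while iterating DOWN then reverse = cons while iterating down, no final reverse)
def buildEnd (r : List Int) (N : Int) : List Int :=
  (PySem.List.pyRange (N - 1) (-1) (-1)).foldl
    (fun acc j =>
      (if j = N - 1 ∨ PySem.List.pyGetD r (j + 1) 0 = 0 then j else acc.headD 0) :: acc)
    []

-- one row of the climb: O(1) lookups in the two tables
def stepB (ladder : List (List Int)) (N : Int) (col row : Int) : Int :=
  let r := PySem.List.pyGetD ladder row []
  if 0 < col ∧ PySem.List.pyGetD r (col - 1) 0 ≠ 0 then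
    PySem.List.pyGetD (buildStart r N) (col - 1) 0
  else if col < N - 1 ∧ PySem.List.pyGetD r (col + 1) 0 ≠ 0 then
    PySem.List.pyGetD (buildEnd r N) (col + 1) 0
  else col

def choose_ladder_alt (ladder : List (List Int)) (N : Int) : Int :=
  let bottom := PySem.List.pyGetD ladder (N - 1) []
  (PySem.List.pyRange (N - 1) 0 (-1)).foldl (stepB ladder N) ((scanB bottom N).getD 0)

-- ===== PRECONDITION & SPEC =====
-- Pre_ = exactly where the Python A returns: N ≥ 1, a full N×N prefix of the grid (every cell access in range),
-- and a 2 somewhere in the bottom row (otherwise `col` is unbound: NameError). It excludes ragged grids on which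
-- A can still return when the traced path happens to avoid the short rows — that set is path-dependent, not closed-form.
def Pre_choose_ladder (ladder : List (List Int)) (N : Int) : Prop :=
  1 ≤ N ∧ N ≤ (ladder.length : Int) ∧
  (∀ r ∈ ladder.take N.toNat, N ≤ (r.length : Int)) ∧
  (∃ i ∈ PySem.List.pyRange 0 N 1,
      PySem.List.pyGetD (PySem.List.pyGetD ladder (N - 1) []) i 0 = 2)
instance (ladder : List (List Int)) (N : Int) : Decidable (Pre_choose_ladder ladder N) := by
  unfold Pre_choose_ladder; infer_instance

def pvWitness_choose_ladder : List (List Int) × Int := ([[0, 1, 0], [1, 1, 0], [0, 2, 0]], 3)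

def Spec_choose_ladder (ladder : List (List Int)) (N : Int) (out : Int) : Prop := out = choose_ladder_alt ladder N
instance (ladder : List (List Int)) (N : Int) (out : Int) : Decidable (Spec_choose_ladder ladder N out) := by unfold Spec_choose_ladder; infer_instance

-- ===== CLAIM (what is proved, stated in full; the proofs are below) =====
def Claim_equal_choose_ladder : Prop := ∀ (ladder : List (List Int)) (N : Int), Dom_choose_ladder ladder N → Pre_choose_ladder ladder N → Spec_choose_ladder ladder N (choose_ladder ladder N)

-- ===== LEMMAS AND PROOFS =====

-- the intended value of B's start table: left end of the truthy run reaching j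
def sTab (r : List Int) (j : Int) : Int :=
  if j ≤ 0 then j
  else if PySem.List.pyGetD r (j - 1) 0 = 0 then j
  else sTab r (j - 1)
termination_by j.toNat
decreasing_by omega

-- the intended value of B's end table: right end of the truthy run reaching j
def eTab (r : List Int) (N j : Int) : Int :=
  if N - 1 ≤ j then j
  else if PySem.List.pyGetD r (j + 1) 0 = 0 then j
  else eTab r N (j + 1)
termination_by (N - 1 - j).toNat
decreasing_by omega

-- A's last-match fold is the last element of the filtered list (or the initial accumulator)
theorem lastMatch_foldl (p : Int → Prop) [DecidablePred p] (l : List Int) (a : Option Int) :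
    l.foldl (fun acc i => if p i then some i else acc) a
      = ((l.filter (fun i => decide (p i))).getLast?).or a := by
  induction l generalizing a with
  | nil => simp
  | cons x t ih =>
    by_cases hx : p x
    · simp only [List.foldl_cons, if_pos hx, List.filter_cons, decide_eq_true hx, ih]
      cases hft : (t.filter (fun i => decide (p i))).getLast? with
      | none =>
        have hnil : t.filter (fun i => decide (p i)) = [] := by
          simpa [List.getLast?_eq_none_iff] using hft
        simp [hnil, Option.or]
      | some y =>
        have : (x :: t.filter (fun i => decide (p i))).getLast? = some y := by
          rw [List.getLast?_cons]
          simp [hft]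
        simp [this, Option.or]
    · simp only [List.foldl_cons, if_neg hx, List.filter_cons, ih]
      simp [hx]

-- B's first-match-from-the-right is the last match from the left
theorem find?_reverse_eq_getLast_filter (p : Int → Bool) (l : List Int) :
    l.reverse.find? p = (l.filter p).getLast? := by
  induction l with
  | nil => simp
  | cons x t ih =>
    rw [List.reverse_cons, List.find?_append, ih, List.filter_cons]
    by_cases hx : p x
    · simp only [hx, if_pos]
      cases hft : (t.filter p).getLast? with
      | none =>
        have hnil : t.filter p = [] := by
          simpa [List.getLast?_eq_none_iff] using hft
        simp [hnil, hx]
      | some y =>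
        have hgl : (x :: t.filter p).getLast? = some y := by
          rw [List.getLast?_cons]; simp [hft]
        simp [hft, hgl]
    · simp [hx]

-- the two initial columns coincide
theorem scan_eq (ladder : List (List Int)) (N : Int) :
    (chooseScanA ladder N).getD 0 = ((scanB (PySem.List.pyGetD ladder (N - 1) []) N).getD 0) := by
  unfold chooseScanA scanB
  rw [lastMatch_foldl, PySem.List.pyRange_neg_one_eq_reverse,
      show (-1 : Int) + 1 = 0 by norm_num, show N - 1 + 1 = N by ring,
      find?_reverse_eq_getLast_filter]
  simp [Option.or_none]

-- the start-table fold builds (the reverse of) the sTab values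
theorem buildStart_fold (r : List Int) :
    ∀ (n : Nat) (M : Int), M.toNat = n →
      (PySem.List.pyRange 0 M 1).foldl
        (fun acc j =>
          (if j = 0 ∨ PySem.List.pyGetD r (j - 1) 0 = 0 then j else acc.headD 0) :: acc)
        []
      = ((PySem.List.pyRange 0 M 1).map (fun j => sTab r j)).reverse := by
  intro n
  induction n with
  | zero =>
    intro M hM
    rw [PySem.List.pyRange_one_eq_nil (by omega)]
    simp
  | succ n ih =>
    intro M hM
    have h1 : PySem.List.pyRange 0 M 1 = PySem.List.pyRange 0 (M - 1) 1 ++ [M - 1] := by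
      have := PySem.List.pyRange_one_succ_right (a := 0) (b := M - 1) (by omega)
      rw [show M - 1 + 1 = M by omega] at this
      exact this
    rw [h1, List.foldl_append, List.map_append, List.reverse_append,
        ih (M - 1) (by omega), List.foldl_cons, List.foldl_nil]
    by_cases hz : M - 1 = 0 ∨ PySem.List.pyGetD r (M - 1 - 1) 0 = 0
    · have hs : sTab r (M - 1) = M - 1 := by
        rw [sTab]
        rcases hz with h | h
        · rw [if_pos (by omega)]
        · by_cases h0 : M - 1 ≤ 0
          · rw [if_pos h0]
          · rw [if_neg h0, if_pos h]
      simp [hz, hs]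
    · push_neg at hz
      have hM1 : (1 : Int) ≤ M - 1 := by omega
      have h2 : PySem.List.pyRange 0 (M - 1) 1 = PySem.List.pyRange 0 (M - 2) 1 ++ [M - 2] := by
        have := PySem.List.pyRange_one_succ_right (a := 0) (b := M - 2) (by omega)
        rw [show M - 2 + 1 = M - 1 by omega] at this
        exact this
      have hhead :
          (((PySem.List.pyRange 0 (M - 1) 1).map (fun j => sTab r j)).reverse).headD 0
            = sTab r (M - 2) := by
        rw [h2]; simp
      have hs : sTab r (M - 1) = sTab r (M - 2) := by
        rw [sTab, if_neg (by omega), show M - 1 - 1 = M - 2 by ring,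
            if_neg (by rw [show M - 2 = M - 1 - 1 by ring]; exact hz.2)]
      rw [if_neg (by push_neg; exact hz), hhead]
      simp [hs]

-- hence the start table is the list of sTab values
theorem buildStart_eq (r : List Int) (N : Int) :
    buildStart r N = (PySem.List.pyRange 0 N 1).map (fun j => sTab r j) := by
  unfold buildStart
  rw [buildStart_fold r N.toNat N rfl, List.reverse_reverse]

-- the end-table fold invariant, peeling the countdown range from the front
theorem buildEnd_fold (r : List Int) (N : Int) :
    ∀ (n : Nat) (K : Int), -1 ≤ K → K ≤ N - 1 → (K + 1).toNat = n →
      (PySem.List.pyRange K (-1) (-1)).foldl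
        (fun acc j =>
          (if j = N - 1 ∨ PySem.List.pyGetD r (j + 1) 0 = 0 then j else acc.headD 0) :: acc)
        ((PySem.List.pyRange (K + 1) N 1).map (fun j => eTab r N j))
      = (PySem.List.pyRange 0 N 1).map (fun j => eTab r N j) := by
  intro n
  induction n with
  | zero =>
    intro K h1 h2 hn
    have hK : K = -1 := by omega
    subst hK
    rw [PySem.List.pyRange_neg_one_eq_nil (by omega)]
    norm_num
  | succ n ih =>
    intro K h1 h2 hn
    have hK0 : 0 ≤ K := by omega
    rw [PySem.List.pyRange_neg_one_cons (by omega), List.foldl_cons]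
    have hval :
        (if K = N - 1 ∨ PySem.List.pyGetD r (K + 1) 0 = 0 then K
          else (((PySem.List.pyRange (K + 1) N 1).map (fun j => eTab r N j)).headD 0))
          = eTab r N K := by
      by_cases hz : K = N - 1 ∨ PySem.List.pyGetD r (K + 1) 0 = 0
      · rw [if_pos hz]
        rcases hz with h | h
        · rw [eTab, if_pos (by omega)]
        · by_cases h0 : N - 1 ≤ K
          · rw [eTab, if_pos h0]
          · rw [eTab, if_neg h0, if_pos h]
      · push_neg at hz
        obtain ⟨hz1, hz2⟩ := hz
        rw [if_neg (by push_neg; exact ⟨hz1, hz2⟩),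
            PySem.List.pyRange_one_cons (by omega)]
        conv_rhs => rw [eTab]
        rw [if_neg (by omega), if_neg hz2]
        simp
    have hcons :
        eTab r N K :: (PySem.List.pyRange (K + 1) N 1).map (fun j => eTab r N j)
          = (PySem.List.pyRange K N 1).map (fun j => eTab r N j) := by
      conv_rhs => rw [PySem.List.pyRange_one_cons (show K < N by omega)]
      simp
    rw [hval, hcons]
    have := ih (K - 1) (by omega) (by omega) (by omega)
    rw [show K - 1 + 1 = K by omega] at this
    exact this

-- hence the end table is the list of eTab values
theorem buildEnd_eq (r : List Int) (N : Int) (hN : 0 ≤ N) :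
    buildEnd r N = (PySem.List.pyRange 0 N 1).map (fun j => eTab r N j) := by
  unfold buildEnd
  have := buildEnd_fold r N N.toNat (N - 1) (by omega) (by omega) (by omega)
  rw [show N - 1 + 1 = N by omega, PySem.List.pyRange_one_eq_nil (le_refl N)] at this
  simpa using this
-- A's left run computes exactly sTab (guarded form)
theorem runLeftA_sTab (ladder : List (List Int)) (row : Int) :
    ∀ (n : Nat) (c : Int), 0 ≤ c → c.toNat = n →
      runLeftA ladder row c n
        = (if c = 0 ∨ PySem.List.pyGetD (PySem.List.pyGetD ladder row []) (c - 1) 0 = 0 then c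
            else sTab (PySem.List.pyGetD ladder row []) (c - 1)) := by
  intro n
  induction n with
  | zero =>
    intro c hc hn
    have hc0 : c = 0 := by omega
    subst hc0
    simp [runLeftA]
  | succ n ih =>
    intro c hc hn
    by_cases hz : c = 0 ∨ PySem.List.pyGetD (PySem.List.pyGetD ladder row []) (c - 1) 0 = 0
    · rw [runLeftA, if_neg (by tauto), if_pos hz]
    · push_neg at hz
      rw [runLeftA, if_pos ⟨hz.1, hz.2⟩, if_neg (by push_neg; exact hz),
          ih (c - 1) (by omega) (by omega)]
      by_cases h1 : c - 1 = 0
      · rw [if_pos (Or.inl h1), sTab, if_pos (by omega)]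
      · by_cases h2 : PySem.List.pyGetD (PySem.List.pyGetD ladder row []) (c - 1 - 1) 0 = 0
        · rw [if_pos (Or.inr h2), sTab, if_neg (by omega), if_pos h2]
        · rw [if_neg (by push_neg; exact ⟨h1, h2⟩)]
          conv_rhs => rw [sTab]
          rw [if_neg (by omega), if_neg h2]

-- A's right run computes exactly eTab (guarded form)
theorem runRightA_eTab (ladder : List (List Int)) (N row : Int) :
    ∀ (n : Nat) (c : Int), c ≤ N - 1 → (N - 1 - c).toNat = n →
      runRightA ladder N row c n
        = (if c = N - 1 ∨ PySem.List.pyGetD (PySem.List.pyGetD ladder row []) (c + 1) 0 = 0 then c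
            else eTab (PySem.List.pyGetD ladder row []) N (c + 1)) := by
  intro n
  induction n with
  | zero =>
    intro c hc hn
    have hc0 : c = N - 1 := by omega
    subst hc0
    simp [runRightA]
  | succ n ih =>
    intro c hc hn
    by_cases hz : c = N - 1 ∨ PySem.List.pyGetD (PySem.List.pyGetD ladder row []) (c + 1) 0 = 0
    · rw [runRightA, if_neg (by tauto), if_pos hz]
    · push_neg at hz
      rw [runRightA, if_pos ⟨hz.1, hz.2⟩, if_neg (by push_neg; exact hz),
          ih (c + 1) (by omega) (by omega)]
      by_cases h1 : c + 1 = N - 1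
      · rw [if_pos (Or.inl h1), eTab, if_pos (by omega)]
      · by_cases h2 : PySem.List.pyGetD (PySem.List.pyGetD ladder row []) (c + 1 + 1) 0 = 0
        · rw [if_pos (Or.inr h2), eTab, if_neg (by omega), if_pos h2]
        · rw [if_neg (by push_neg; exact ⟨h1, h2⟩)]
          conv_rhs => rw [eTab]
          rw [if_neg (by omega), if_neg h2]

-- bounds for the table values
theorem sTab_bounds (r : List Int) :
    ∀ (n : Nat) (j : Int), 0 ≤ j → j.toNat = n → 0 ≤ sTab r j ∧ sTab r j ≤ j := by
  intro n
  induction n with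
  | zero =>
    intro j h0 hn
    have : j = 0 := by omega
    subst this
    rw [sTab, if_pos le_rfl]
    omega
  | succ n ih =>
    intro j h0 hn
    rw [sTab, if_neg (by omega)]
    by_cases h2 : PySem.List.pyGetD r (j - 1) 0 = 0
    · rw [if_pos h2]; omega
    · rw [if_neg h2]
      have := ih (j - 1) (by omega) (by omega)
      omega

theorem eTab_bounds (r : List Int) (N : Int) :
    ∀ (n : Nat) (j : Int), j ≤ N - 1 → (N - 1 - j).toNat = n →
      j ≤ eTab r N j ∧ eTab r N j ≤ N - 1 := by
  intro n
  induction n with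
  | zero =>
    intro j h0 hn
    have : j = N - 1 := by omega
    subst this
    rw [eTab, if_pos le_rfl]
    omega
  | succ n ih =>
    intro j h0 hn
    rw [eTab, if_neg (by omega)]
    by_cases h2 : PySem.List.pyGetD r (j + 1) 0 = 0
    · rw [if_pos h2]; omega
    · rw [if_neg h2]
      have := ih (j + 1) (by omega) (by omega)
      omega

-- one step of B, rewritten through the table characterisations
theorem stepB_eq (ladder : List (List Int)) (N col row : Int)
    (h0 : 0 ≤ col) (h1 : col ≤ N - 1) :
    stepB ladder N col row
      = (let r := PySem.List.pyGetD ladder row []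
         if 0 < col ∧ PySem.List.pyGetD r (col - 1) 0 ≠ 0 then sTab r (col - 1)
         else if col < N - 1 ∧ PySem.List.pyGetD r (col + 1) 0 ≠ 0 then eTab r N (col + 1)
         else col) := by
  unfold stepB
  dsimp only
  split_ifs with hL hR
  · rw [buildStart_eq,
        PySem.List.pyGetD_map_pyRange_of_nonneg _ _ _ _ (by omega) (by omega)]
  · rw [buildEnd_eq _ _ (by omega),
        PySem.List.pyGetD_map_pyRange_of_nonneg _ _ _ _ (by omega) (by omega)]
  · rfl

theorem stepB_bounds (ladder : List (List Int)) (N col row : Int)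
    (h0 : 0 ≤ col) (h1 : col ≤ N - 1) :
    0 ≤ stepB ladder N col row ∧ stepB ladder N col row ≤ N - 1 := by
  rw [stepB_eq ladder N col row h0 h1]
  dsimp only
  split_ifs with hL hR
  · have := sTab_bounds (PySem.List.pyGetD ladder row []) (col - 1).toNat (col - 1) (by omega) rfl
    omega
  · have := eTab_bounds (PySem.List.pyGetD ladder row []) N (N - 1 - (col + 1)).toNat (col + 1) (by omega) rfl
    omega
  · omega

-- A's climb loop is B's row fold
theorem climb_eq (ladder : List (List Int)) (N : Int) :
    ∀ (n : Nat) (row col : Int), 0 ≤ col → col ≤ N - 1 → row.toNat = n →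
      climbA ladder N row col = (PySem.List.pyRange row 0 (-1)).foldl (stepB ladder N) col := by
  intro n
  induction n with
  | zero =>
    intro row col h0 h1 hr
    rw [climbA, dif_neg (by omega), PySem.List.pyRange_neg_one_eq_nil (by omega)]
    rfl
  | succ n ih =>
    intro row col h0 h1 hr
    have hrow : 0 < row := by omega
    have hstep := stepB_bounds ladder N col row h0 h1
    rw [PySem.List.pyRange_neg_one_cons (by omega), List.foldl_cons, climbA, dif_pos hrow]
    by_cases hL : col ≠ 0 ∧ PySem.List.pyGetD (PySem.List.pyGetD ladder row []) (col - 1) 0 ≠ 0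
    · rw [if_pos hL]
      have hmove : runLeftA ladder row col col.toNat = stepB ladder N col row := by
        rw [runLeftA_sTab ladder row col.toNat col h0 rfl,
            if_neg (by push_neg; exact ⟨hL.1, hL.2⟩),
            stepB_eq ladder N col row h0 h1]
        dsimp only
        rw [if_pos ⟨by omega, hL.2⟩]
      rw [hmove]
      exact ih (row - 1) _ hstep.1 hstep.2 (by omega)
    · rw [if_neg hL]
      by_cases hR : col ≠ N - 1 ∧ PySem.List.pyGetD (PySem.List.pyGetD ladder row []) (col + 1) 0 ≠ 0
      · rw [if_pos hR]
        have hmove : runRightA ladder N row col (N - 1 - col).toNat = stepB ladder N col row := by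
          rw [runRightA_eTab ladder N row (N - 1 - col).toNat col h1 rfl,
              if_neg (by push_neg; exact ⟨hR.1, hR.2⟩),
              stepB_eq ladder N col row h0 h1]
          dsimp only
          rw [if_neg (fun hc => hL ⟨by omega, hc.2⟩), if_pos ⟨by omega, hR.2⟩]
        rw [hmove]
        exact ih (row - 1) _ hstep.1 hstep.2 (by omega)
      · rw [if_neg hR]
        have hmove : col = stepB ladder N col row := by
          rw [stepB_eq ladder N col row h0 h1]
          dsimp only
          rw [if_neg (fun hc => hL ⟨by omega, hc.2⟩), if_neg (fun hc => hR ⟨by omega, hc.2⟩)]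
        rw [← hmove] at hstep ⊢
        exact ih (row - 1) col h0 h1 (by omega)

theorem col0_bounds (ladder : List (List Int)) (N : Int) (hN : 1 ≤ N) :
    0 ≤ (chooseScanA ladder N).getD 0 ∧ (chooseScanA ladder N).getD 0 ≤ N - 1 := by
  unfold chooseScanA
  rw [lastMatch_foldl]
  cases h : ((PySem.List.pyRange 0 N 1).filter
      (fun i => decide (PySem.List.pyGetD (PySem.List.pyGetD ladder (N - 1) []) i 0 = 2))).getLast? with
  | none => simp [Option.or]; omega
  | some k =>
    have hk := List.mem_of_mem_filter (List.mem_of_getLast? h)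
    rw [PySem.List.mem_pyRange_one] at hk
    simp [Option.or]
    omega

-- ===== VERDICT (by name: the statement is the Claim_ definition above) =====
theorem choose_ladder_spec : Claim_equal_choose_ladder := by
  intro ladder N _ hPre
  obtain ⟨hN, -, -, -⟩ := hPre
  unfold Spec_choose_ladder choose_ladder choose_ladder_alt
  obtain ⟨hc0, hc1⟩ := col0_bounds ladder N hN
  rw [climb_eq ladder N (N - 1).toNat (N - 1) _ hc0 hc1 rfl, scan_eq]
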